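-- pv_equiv track=rewrite | github.com/Drchennnn/FYP | Jiuzhaigou_Crawler/weather_jiuzhaigou.py | month_iter
-- ===== SOURCE A (Python) =====
-- from typing import Dict, Iterable, List, Optional, Tuple
--
-- def month_iter(start_year: int, start_month: int, months_back: int) -> Iterable[Tuple[int, int]]:
--     year, month = start_year, start_month
--     for _ in range(max(months_back, 0)):
--         yield year, month
--         if month == 1:
--             year -= 1
--             month = 12
--         else:
--             month -= 1
-- ===== SOURCE B (Python) =====
-- def month_iter(start_year, start_month, months_back):
--     for i in range(max(months_back, 0)):
--         mi = start_month - i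
--         if mi >= 1:
--             yield (start_year, mi)
--         else:
--             years_borrowed, m0 = divmod(mi - 1, 12)
--             yield (start_year + years_borrowed, m0 + 1)
-- ===== Notes on version B (the rewrite author's own statement) =====
-- stated objective: alternative
-- what changed: B derives each yielded pair directly from the loop index (raw decrement while the month number stays >= 1, otherwise one divmod borrowing whole years) instead of A's stateful decrement-and-wrap loop.
-- intended difference: On calls with months_back >= 1 and a non-positive start_month (an invalid month number), A emits unnormalized pairs like (2020, 0), (2020, -1) while B borrows whole years and emits proper calendar months like (2019, 12); normalized months are the intended output of a month iterator. — e.g. on month_iter(2020, 0, 1): A returns [(2020, 0)], B returns [(2019, 12)]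
import Mathlib
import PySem

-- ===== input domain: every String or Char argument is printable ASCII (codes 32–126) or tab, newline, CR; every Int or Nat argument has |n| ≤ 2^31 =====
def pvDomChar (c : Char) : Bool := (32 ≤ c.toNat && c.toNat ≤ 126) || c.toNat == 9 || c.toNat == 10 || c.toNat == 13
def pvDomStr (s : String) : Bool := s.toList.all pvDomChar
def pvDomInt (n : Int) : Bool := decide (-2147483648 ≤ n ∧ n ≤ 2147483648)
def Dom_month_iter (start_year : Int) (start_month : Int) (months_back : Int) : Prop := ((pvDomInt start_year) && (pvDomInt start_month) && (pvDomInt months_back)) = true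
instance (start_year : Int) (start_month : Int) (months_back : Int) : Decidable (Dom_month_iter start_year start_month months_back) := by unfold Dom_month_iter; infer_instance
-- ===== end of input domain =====

-- B computes each pair from the loop index (raw decrement, divmod year-borrow once below 1) instead of A's stateful wrap loop.
-- ===== PORT A =====
def month_iter_go : Nat → Int → Int → List (Int × Int)
  | 0, _, _ => []
  | n + 1, year, month =>
      (year, month) ::
        (if month == 1 then month_iter_go n (year - 1) 12
         else month_iter_go n year (month - 1))

def month_iter (start_year : Int) (start_month : Int) (months_back : Int) : List (Int × Int) :=
  month_iter_go (max months_back 0).toNat start_year start_month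

-- ===== PORT B =====
-- the pair Source B yields at loop index i: the raw decrement while it stays ≥ 1, else divmod borrowing whole years
def pvPairB (start_year start_month i : Int) : Int × Int :=
  let mi := start_month - i
  if 1 ≤ mi then (start_year, mi)
  else (start_year + PySem.Int.floordiv (mi - 1) 12, PySem.Int.mod (mi - 1) 12 + 1)

def month_iter_alt (start_year : Int) (start_month : Int) (months_back : Int) : List (Int × Int) :=
  (List.range (max months_back 0).toNat).map (fun (i : Nat) => pvPairB start_year start_month (i : Int))

-- ===== PRECONDITION & SPEC =====
-- On calls with months_back ≥ 1 and a non-positive start_month (an invalid month number), A emits unnormalized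
-- pairs like (2020, 0), (2020, -1) while B borrows whole years and emits proper calendar months like (2019, 12);
-- normalized months are the intended output of a month iterator.
def D_month_iter (start_year : Int) (start_month : Int) (months_back : Int) : Prop :=
  1 ≤ months_back ∧ start_month ≤ 0
instance (start_year : Int) (start_month : Int) (months_back : Int) : Decidable (D_month_iter start_year start_month months_back) := by unfold D_month_iter; infer_instance

def Spec_month_iter (start_year : Int) (start_month : Int) (months_back : Int) (out : List (Int × Int)) : Prop := ¬ D_month_iter start_year start_month months_back → out = month_iter_alt start_year start_month months_back
instance (start_year : Int) (start_month : Int) (months_back : Int) (out : List (Int × Int)) : Decidable (Spec_month_iter start_year start_month months_back out) := by unfold Spec_month_iter; infer_instance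

def pvDiffWitness_month_iter : Int × Int × Int := (2020, 0, 1)
def pvDiffWitnessOut_month_iter : (List (Int × Int)) × (List (Int × Int)) := ([(2020, 0)], [(2019, 12)])

-- ===== CLAIM (what is proved, stated in full; the proofs are below) =====
def Claim_unchanged_month_iter : Prop := ∀ (start_year : Int) (start_month : Int) (months_back : Int), Dom_month_iter start_year start_month months_back → Spec_month_iter start_year start_month months_back (month_iter start_year start_month months_back)
def Claim_changed_month_iter : Prop := Dom_month_iter (pvDiffWitness_month_iter.1) (pvDiffWitness_month_iter.2.1) (pvDiffWitness_month_iter.2.2) ∧ D_month_iter (pvDiffWitness_month_iter.1) (pvDiffWitness_month_iter.2.1) (pvDiffWitness_month_iter.2.2) ∧ month_iter (pvDiffWitness_month_iter.1) (pvDiffWitness_month_iter.2.1) (pvDiffWitness_month_iter.2.2) = pvDiffWitnessOut_month_iter.1 ∧ month_iter_alt (pvDiffWitness_month_iter.1) (pvDiffWitness_month_iter.2.1) (pvDiffWitness_month_iter.2.2) = pvDiffWitnessOut_month_iter.2 ∧ pvDiffWitnessOut_month_iter.1 ≠ pvDiffWitnessOut_month_iter.2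
def Claim_exact_month_iter : Prop := ∀ (start_year : Int) (start_month : Int) (months_back : Int), Dom_month_iter start_year start_month months_back → D_month_iter start_year start_month months_back → month_iter start_year start_month months_back ≠ month_iter_alt start_year start_month months_back

-- ===== LEMMAS AND PROOFS =====

-- pvPairB depends on start_month and the index only through their difference.
theorem pvPairB_congr {y m i m' i' : Int} (h : m - i = m' - i') :
    pvPairB y m i = pvPairB y m' i' := by
  simp only [pvPairB, h]

-- Wrapping at month 1 (state step to (y-1, 12)) shifts B's index by one.
theorem pvPairB_wrap (y : Int) (i : Int) (hi : 0 ≤ i) :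
    pvPairB y 1 (i + 1) = pvPairB (y - 1) 12 i := by
  simp only [pvPairB,
    PySem.Int.floordiv_eq_ediv_of_pos (by norm_num : (0:Int) < 12),
    PySem.Int.mod_eq_emod_of_pos (by norm_num : (0:Int) < 12)]
  split_ifs <;> rw [Prod.mk.injEq] <;> constructor <;> omega

-- With a positive starting month, A's loop over n steps equals B's map over the index range.
theorem month_iter_go_eq (n : Nat) : ∀ (y m : Int), 1 ≤ m →
    month_iter_go n y m = (List.range n).map (fun (i : Nat) => pvPairB y m (i : Int)) := by
  induction n with
  | zero => intro y m _; rfl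
  | succ n ih =>
      intro y m h1
      rw [List.range_succ_eq_map, List.map_cons, List.map_map, month_iter_go]
      congr 1
      · simp only [Nat.cast_zero, pvPairB]
        rw [if_pos (by omega)]
        simp
      · by_cases hm : m = 1
        · subst hm
          rw [if_pos (by simp), ih (y - 1) 12 (by norm_num)]
          refine List.map_congr_left (fun i _ => ?_)
          simp only [Function.comp_apply, Nat.cast_succ]
          exact (pvPairB_wrap y i (Int.natCast_nonneg i)).symm
        · rw [if_neg (by simp [hm]), ih y (m - 1) (by omega)]
          refine List.map_congr_left (fun i _ => ?_)
          simp only [Function.comp_apply, Nat.cast_succ]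
          exact (pvPairB_congr (by ring)).symm

-- Inside D_, the two heads already disagree: A keeps the non-positive month, B normalizes it into 1..12.
theorem month_iter_head_ne (y m : Int) (hm : m ≤ 0) : (y, m) ≠ pvPairB y m 0 := by
  simp only [pvPairB,
    PySem.Int.floordiv_eq_ediv_of_pos (by norm_num : (0:Int) < 12),
    PySem.Int.mod_eq_emod_of_pos (by norm_num : (0:Int) < 12)]
  rw [if_neg (by omega)]
  intro h
  have h2 := congrArg Prod.snd h
  simp only at h2
  have := Int.emod_nonneg (m - 0 - 1) (by norm_num : (12:Int) ≠ 0)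
  omega

-- ===== VERDICT (by name: the statement is the Claim_ definition above) =====
theorem month_iter_spec : Claim_unchanged_month_iter := by
  intro y m n _ hD
  unfold month_iter month_iter_alt
  unfold D_month_iter at hD
  by_cases hn : 1 ≤ n
  · have hm : 1 ≤ m := by omega
    exact month_iter_go_eq _ y m hm
  · have : (max n 0).toNat = 0 := by omega
    rw [this]; rfl

theorem month_iter_changed : Claim_changed_month_iter := by
  unfold Claim_changed_month_iter; decide

theorem month_iter_tight : Claim_exact_month_iter := by
  intro y m n _ hD heq
  unfold D_month_iter at hD
  unfold month_iter month_iter_alt at heq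
  obtain ⟨k, hk⟩ : ∃ k, (max n 0).toNat = k + 1 := by
    refine ⟨(max n 0).toNat - 1, ?_⟩; omega
  rw [hk, month_iter_go, List.range_succ_eq_map, List.map_cons] at heq
  have hhead := List.head_eq_of_cons_eq heq
  rw [Nat.cast_zero] at hhead
  exact month_iter_head_ne y m hD.2 hhead
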